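-- pv_equiv track=rewrite | github.com/gawainx/huawei-oj | HJ27.py | check_brother
-- ===== SOURCE A (Python) =====
-- from collections import defaultdict
--
-- def check_brother(src, tar):
--     if src == tar:
--         return False
--     chr2dict = defaultdict(int)
--     for c in src:
--         chr2dict[c] += 1
--
--     for c in tar:
--         if chr2dict[c] > 0:
--             chr2dict[c] -= 1
--         else:
--             return False
--     for k_, v in chr2dict.items():
--         if v != 0:
--             return False
--     return True
-- ===== SOURCE B (Python) =====
-- def check_brother(src, tar):
--     if src == tar:
--         return False
--     return sorted(src) == sorted(tar)
-- ===== Notes on version B (the rewrite author's own statement) =====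
-- stated objective: simpler
-- what changed: Replaced the three-pass frequency-dict accumulate/decrement/verify with a single sort-and-compare after the same inequality guard.
import Mathlib
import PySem

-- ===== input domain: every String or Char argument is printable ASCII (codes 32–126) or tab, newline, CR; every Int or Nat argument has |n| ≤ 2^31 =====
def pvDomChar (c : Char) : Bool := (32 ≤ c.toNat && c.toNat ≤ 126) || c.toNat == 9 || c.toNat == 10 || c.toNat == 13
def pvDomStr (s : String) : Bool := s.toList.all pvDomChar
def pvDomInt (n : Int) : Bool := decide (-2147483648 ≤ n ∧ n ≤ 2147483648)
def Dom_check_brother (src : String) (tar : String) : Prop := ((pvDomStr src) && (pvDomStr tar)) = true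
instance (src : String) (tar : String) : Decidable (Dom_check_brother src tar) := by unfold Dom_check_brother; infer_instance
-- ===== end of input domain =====

-- B replaces A's three frequency-dict passes (count src, decrement along tar, verify all zero)
-- with a single sort-and-compare after the same inequality guard (objective: simpler).

-- ===== PORT A =====
-- second loop of A: for c in tar: if chr2dict[c] > 0: chr2dict[c] -= 1 else: return False
-- (the defaultdict access in the failing branch inserts c→0 into the dict, but A returns
-- False immediately there, so that mutation never affects the returned value)
def pvTarLoop : List Char → PySem.Dict Char Int → Option (PySem.Dict Char Int)
  | [], d => some d
  | c :: rest, d =>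
    if d.getD c 0 > 0 then pvTarLoop rest (d.modify c 0 (· - 1)) else none

def check_brother (src : String) (tar : String) : Bool :=
  if src == tar then false
  else
    -- first loop: chr2dict[c] += 1 over src (defaultdict(int))
    let d := src.toList.foldl (fun d c => d.modify c 0 (· + 1)) PySem.Dict.empty
    match pvTarLoop tar.toList d with
    | none => false
    | some d' =>
      -- third loop: for k_, v in chr2dict.items(): if v != 0: return False — then return True
      d'.items.all (fun kv => kv.2 == 0)

-- ===== PORT B =====
def check_brother_alt (src : String) (tar : String) : Bool :=
  if src == tar then false
  else (PySem.List.sorted src.toList (fun x => x) false)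
         == (PySem.List.sorted tar.toList (fun x => x) false)

-- ===== PRECONDITION & SPEC =====
def Spec_check_brother (src : String) (tar : String) (out : Bool) : Prop := out = check_brother_alt src tar
instance (src : String) (tar : String) (out : Bool) : Decidable (Spec_check_brother src tar out) := by unfold Spec_check_brother; infer_instance

-- ===== CLAIM (what is proved, stated in full; the proofs are below) =====
def Claim_equal_check_brother : Prop := ∀ (src : String) (tar : String), Dom_check_brother src tar → Spec_check_brother src tar (check_brother src tar)

-- ===== LEMMAS AND PROOFS =====

-- A's decrement-then-verify phases succeed exactly when d holds the multiset counts of ts.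
theorem pvTarLoop_spec (ts : List Char) (d : PySem.Dict Char Int) (hnd : d.keys.Nodup) :
    (match pvTarLoop ts d with
     | none => false
     | some d' => d'.items.all (fun kv => kv.2 == 0)) = true
      ↔ ∀ c, d.getD c 0 = ts.count c := by
  induction ts generalizing d with
  | nil =>
    simp only [pvTarLoop, List.count_nil, Nat.cast_zero, List.all_eq_true]
    rw [PySem.Dict.items_eq_map_keys d hnd 0]
    constructor
    · intro h c
      by_cases hc : d.contains c = true
      · have hk : c ∈ d.keys := (PySem.Dict.contains_iff_mem_keys d c).mp hc
        have := h _ (List.mem_map.mpr ⟨c, hk, rfl⟩)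
        simpa using this
      · exact PySem.Dict.getD_of_not_contains d 0 (by simpa using hc)
    · intro h kv hkv
      rcases List.mem_map.mp hkv with ⟨k, _, rfl⟩
      simpa using h k
  | cons c rest ih =>
    simp only [pvTarLoop]
    have hcc : ∀ c' : Char, (((c :: rest).count c' : Int))
        = ((rest.count c' : Int) + if c' = c then 1 else 0) := by
      intro c'
      rw [List.count_cons]
      push_cast
      by_cases hc' : c' = c
      · subst hc'; simp
      · simp [hc', Ne.symm hc']
    by_cases hpos : d.getD c 0 > 0
    · have hcont : d.contains c = true := by
        by_contra hnc
        have h0 := PySem.Dict.getD_of_not_contains d (k := c) 0 (by simpa using hnc)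
        omega
      have hnd' : (d.modify c 0 (· - 1)).keys.Nodup := by
        rw [PySem.Dict.keys_modify]
        exact PySem.Dict.nodup_keys_insert _ _ _ hnd
      rw [if_pos hpos, ih _ hnd']
      constructor
      · intro h c'
        have h1 := h c'
        rw [PySem.Dict.getD_modify] at h1
        rw [hcc c']
        by_cases hc' : c' = c
        · subst hc'; rw [if_pos rfl] at h1 ⊢; omega
        · rw [if_neg hc'] at h1 ⊢; omega
      · intro h c'
        rw [PySem.Dict.getD_modify]
        have h1 := h c'
        rw [hcc c'] at h1
        by_cases hc' : c' = c
        · subst hc'; rw [if_pos rfl] at h1 ⊢; omega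
        · rw [if_neg hc'] at h1 ⊢; omega
    · rw [if_neg hpos]
      constructor
      · intro h; simp at h
      · intro h
        have h1 := h c
        rw [hcc c, if_pos rfl] at h1
        exact absurd h1 (by omega)

-- A's whole dict pipeline equals B's sorted-comparison.
theorem pipe_eq (ss ts : List Char) :
    (match pvTarLoop ts (PySem.Dict.counter ss) with
      | none => false
      | some d' => d'.items.all (fun kv => kv.2 == 0))
    = ((PySem.List.sorted ss (fun x => x) false) == (PySem.List.sorted ts (fun x => x) false)) := by
  rw [Bool.eq_iff_iff, pvTarLoop_spec ts _ (PySem.Dict.nodup_keys_counter ss), beq_iff_eq,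
      PySem.List.sorted_id_eq_sorted_id_iff_perm, List.perm_iff_count]
  constructor
  · intro h c
    have h1 := h c
    rw [PySem.Dict.getD_counter] at h1
    exact_mod_cast h1
  · intro h c
    rw [PySem.Dict.getD_counter]
    exact_mod_cast h c

theorem check_brother_spec_aux (src tar : String) :
    check_brother src tar = check_brother_alt src tar := by
  unfold check_brother check_brother_alt
  by_cases h : (src == tar) = true
  · simp [h]
  · rw [if_neg h, if_neg h]
    show (match pvTarLoop tar.toList
            (src.toList.foldl (fun d c => d.modify c 0 (· + 1)) PySem.Dict.empty) with
          | none => false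
          | some d' => d'.items.all (fun kv => kv.2 == 0)) = _
    rw [(PySem.Dict.counter_eq_foldl src.toList).symm]
    exact pipe_eq src.toList tar.toList

-- ===== VERDICT (by name: the statement is the Claim_ definition above) =====
theorem check_brother_spec : Claim_equal_check_brother := by
  intro src tar _
  exact check_brother_spec_aux src tar
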